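-- pv_equiv track=rewrite | github.com/QuiqueCrespo/py-apperception | code/ECA.py | decay_touch_sensor_readings2
-- ===== SOURCE A (Python) =====
-- def decay_touch_sensor_readings2(x_list, y_list):
--     # Haskell: decay_touch_sensor_readings2 [] _ = []; decay_touch_sensor_readings2 (x:xs) y = (x':xs') where x' = map f (zip x y); xs' = decay_touch_sensor_readings2 xs x'; f (n1, n2) | n2 > n1 = n2 - 1; f (n1, n2) | otherwise = n1
--     if not x_list:
--         return []
--
--     x_head = x_list[0]
--     x_tail = x_list[1:]
--
--     x_prime = []
--     for n1, n2 in zip(x_head, y_list):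
--         if n2 > n1:
--             x_prime.append(n2 - 1)
--         else:
--             x_prime.append(n1)
--
--     xs_prime = decay_touch_sensor_readings2(x_tail, x_prime)
--     return [x_prime] + xs_prime
-- ===== SOURCE B (Python) =====
-- def decay_touch_sensor_readings2(x_list, y_list):
--     result = []
--     prev = y_list
--     for row in x_list:
--         x_prime = [n2 - 1 if n2 > n1 else n1 for n1, n2 in zip(row, prev)]
--         result.append(x_prime)
--         prev = x_prime
--     return result
-- ===== Notes on version B (the rewrite author's own statement) =====
-- stated objective: idiomatic
-- what changed: Replaced the head/tail recursion with slicing and list concatenation by a single iterative forward scan that threads the previously computed row through an accumulator and appends each new row once.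
import Mathlib
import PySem

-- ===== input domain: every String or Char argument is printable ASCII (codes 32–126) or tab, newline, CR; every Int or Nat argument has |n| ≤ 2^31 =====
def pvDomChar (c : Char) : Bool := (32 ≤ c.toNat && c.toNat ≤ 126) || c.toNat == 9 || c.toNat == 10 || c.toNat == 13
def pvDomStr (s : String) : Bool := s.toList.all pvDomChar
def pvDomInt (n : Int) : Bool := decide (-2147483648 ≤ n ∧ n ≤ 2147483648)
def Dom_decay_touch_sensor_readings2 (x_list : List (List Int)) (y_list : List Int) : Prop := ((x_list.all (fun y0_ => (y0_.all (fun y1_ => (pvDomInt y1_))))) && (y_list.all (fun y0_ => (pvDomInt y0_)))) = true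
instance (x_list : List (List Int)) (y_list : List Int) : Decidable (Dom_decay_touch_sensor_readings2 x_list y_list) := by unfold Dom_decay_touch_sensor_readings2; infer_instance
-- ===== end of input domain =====

-- B replaces A's recursion-with-slicing-and-concatenation by one iterative forward scan (idiomatic, no speed claim proved here).


-- ===== PORT A =====
-- literal transliteration of A: recursion on x_list; x_prime built by a foldl append over zip(x_head, y_list)
def decay_touch_sensor_readings2 (x_list : List (List Int)) (y_list : List Int) : List (List Int) :=
  match x_list with
  | [] => []
  | x_head :: x_tail =>
    let x_prime := (x_head.zip y_list).foldl
      (fun acc p => if p.2 > p.1 then acc ++ [p.2 - 1] else acc ++ [p.1]) []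
    let xs_prime := decay_touch_sensor_readings2 x_tail x_prime
    [x_prime] ++ xs_prime

-- ===== PORT B =====
-- literal transliteration of B: fold over the rows, state = (prev, result); x_prime by comprehension over zip(row, prev)
def decay_touch_sensor_readings2_alt (x_list : List (List Int)) (y_list : List Int) : List (List Int) :=
  (x_list.foldl
    (fun (st : List Int × List (List Int)) row =>
      let x_prime := (row.zip st.1).map (fun p => if p.2 > p.1 then p.2 - 1 else p.1)
      (x_prime, st.2 ++ [x_prime]))
    (y_list, [])).2

-- ===== PRECONDITION & SPEC =====
def Spec_decay_touch_sensor_readings2 (x_list : List (List Int)) (y_list : List Int) (out : List (List Int)) : Prop := out = decay_touch_sensor_readings2_alt x_list y_list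
instance (x_list : List (List Int)) (y_list : List Int) (out : List (List Int)) : Decidable (Spec_decay_touch_sensor_readings2 x_list y_list out) := by unfold Spec_decay_touch_sensor_readings2; infer_instance

-- ===== CLAIM (what is proved, stated in full; the proofs are below) =====
def Claim_equal_decay_touch_sensor_readings2 : Prop := ∀ (x_list : List (List Int)) (y_list : List Int), Dom_decay_touch_sensor_readings2 x_list y_list → Spec_decay_touch_sensor_readings2 x_list y_list (decay_touch_sensor_readings2 x_list y_list)

-- ===== LEMMAS AND PROOFS =====

-- A's inner foldl-append build equals a map over the zipped list.
theorem pv_inner_eq (l : List (Int × Int)) (acc : List Int) :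
    l.foldl (fun acc p => if p.2 > p.1 then acc ++ [p.2 - 1] else acc ++ [p.1]) acc
      = acc ++ l.map (fun p => if p.2 > p.1 then p.2 - 1 else p.1) := by
  induction l generalizing acc with
  | nil => simp
  | cons h t ih =>
    simp only [List.foldl_cons, List.map_cons, ih]
    split_ifs <;> simp

-- B's fold, started at any (prev, acc), appends A's recursion result to acc.
theorem pv_fold_eq (xs : List (List Int)) (prev : List Int) (acc : List (List Int)) :
    (xs.foldl
      (fun (st : List Int × List (List Int)) row =>
        let x_prime := (row.zip st.1).map (fun p => if p.2 > p.1 then p.2 - 1 else p.1)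
        (x_prime, st.2 ++ [x_prime]))
      (prev, acc)).2 = acc ++ decay_touch_sensor_readings2 xs prev := by
  induction xs generalizing prev acc with
  | nil => simp [decay_touch_sensor_readings2]
  | cons h t ih =>
    simp only [List.foldl_cons, decay_touch_sensor_readings2, pv_inner_eq, List.nil_append]
    rw [ih]
    simp

-- ===== VERDICT (by name: the statement is the Claim_ definition above) =====
theorem decay_touch_sensor_readings2_spec : Claim_equal_decay_touch_sensor_readings2 := by
  intro x_list y_list _
  unfold Spec_decay_touch_sensor_readings2 decay_touch_sensor_readings2_alt
  rw [pv_fold_eq]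
  simp
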